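-- pv_equiv track=rewrite | github.com/yashlad27/SummerScout25 | src/utils/text.py | is_remote_location
-- ===== SOURCE A (Python) =====
-- def is_remote_location(location: str | None) -> bool:
--     """Check if location indicates remote work.
--
--     Args:
--         location: Location string
--
--     Returns:
--         True if remote, False otherwise
--     """
--     if not location:
--         return False
--
--     location_lower = location.lower()
--
--     remote_keywords = [
--         "remote",
--         "work from home",
--         "wfh",
--         "anywhere",
--         "distributed",
--         "virtual",
--     ]
--
--     return any(keyword in location_lower for keyword in remote_keywords)
-- ===== SOURCE B (Python) =====
-- _KEYWORDS = ("remote", "work from home", "wfh", "anywhere", "distributed", "virtual")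
--
--
-- def is_remote_location(location):
--     """Check if location indicates remote work (single left-to-right scan:
--     at each position, test whether any keyword starts there)."""
--     if not location:
--         return False
--     s = location.lower()
--     return any(s.startswith(k, i) for i in range(len(s)) for k in _KEYWORDS)
-- ===== Notes on version B (the rewrite author's own statement) =====
-- stated objective: alternative
-- what changed: Replaces the per-keyword substring scan (any(keyword in s)) by a single left-to-right scan over positions, testing at each position whether any keyword starts there with str.startswith.
import Mathlib
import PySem

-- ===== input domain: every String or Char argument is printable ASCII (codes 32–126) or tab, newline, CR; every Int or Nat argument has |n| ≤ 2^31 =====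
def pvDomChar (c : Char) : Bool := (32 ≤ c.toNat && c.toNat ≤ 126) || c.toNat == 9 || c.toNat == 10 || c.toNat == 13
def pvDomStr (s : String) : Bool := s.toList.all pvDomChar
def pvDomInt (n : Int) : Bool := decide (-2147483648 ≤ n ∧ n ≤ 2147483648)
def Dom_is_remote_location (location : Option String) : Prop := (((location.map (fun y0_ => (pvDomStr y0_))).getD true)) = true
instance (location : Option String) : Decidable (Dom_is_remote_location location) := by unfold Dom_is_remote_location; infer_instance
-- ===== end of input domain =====

-- B replaces A's per-keyword substring scan by one positional left-to-right scan
-- (at each position: does some keyword start here?); alternative decomposition, same cost.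

-- ===== PORT A =====
-- the literal remote_keywords list of A
def aRemoteKeywords : List String :=
  ["remote", "work from home", "wfh", "anywhere", "distributed", "virtual"]

def is_remote_location (location : Option String) : Bool :=
  match location with
  | none => false                                   -- 'if not location: return False'
  | some s =>
    if s = "" then false                            -- empty string is falsy too
    else
      let location_lower := PySem.Str.lower s
      aRemoteKeywords.any (fun keyword => PySem.Str.isIn keyword location_lower)

-- ===== PORT B =====
def bKeywords : List String :=
  ["remote", "work from home", "wfh", "anywhere", "distributed", "virtual"]

-- 'any(s.startswith(k, i) ...)' : walk the positions (= nonempty suffixes) of s,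
-- at each one test whether some keyword is a prefix there
def bScan : List Char → Bool
  | [] => false
  | c :: rest => (bKeywords.any fun k => List.isPrefixOf k.toList (c :: rest)) || bScan rest

def is_remote_location_alt (location : Option String) : Bool :=
  match location with
  | none => false
  | some s =>
    if s = "" then false
    else bScan (PySem.Chars.lower s.toList)

-- ===== PRECONDITION & SPEC =====
def Spec_is_remote_location (location : Option String) (out : Bool) : Prop := out = is_remote_location_alt location
instance (location : Option String) (out : Bool) : Decidable (Spec_is_remote_location location out) := by unfold Spec_is_remote_location; infer_instance

-- ===== CLAIM (what is proved, stated in full; the proofs are below) =====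
def Claim_equal_is_remote_location : Prop := ∀ (location : Option String), Dom_is_remote_location location → Spec_is_remote_location location (is_remote_location location)

-- ===== LEMMAS AND PROOFS =====

-- congruence of any under pointwise-on-members equality
theorem any_congr_mem {α : Type} (l : List α) (f g : α → Bool)
    (h : ∀ a ∈ l, f a = g a) : l.any f = l.any g := by
  induction l with
  | nil => rfl
  | cons a l ih =>
    simp only [List.any_cons, h a (by simp), ih (fun b hb => h b (by simp [hb]))]

-- any distributes over ||
theorem any_or_split {α : Type} (ks : List α) (f g : α → Bool) :
    (ks.any fun k => f k || g k) = (ks.any f || ks.any g) := by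
  induction ks with
  | nil => rfl
  | cons k ks ih =>
    simp only [List.any_cons, ih]
    cases f k <;> cases g k <;> simp

-- substring occurrence in a cons = prefix here, or occurrence further right (keywords are nonempty)
theorem isIn_cons_eq (k : String) (hk : k.toList ≠ []) (c : Char) (rest : List Char) :
    PySem.Chars.isIn k.toList (c :: rest)
      = (List.isPrefixOf k.toList (c :: rest) || PySem.Chars.isIn k.toList rest) := by
  rcases h : (List.isPrefixOf k.toList (c :: rest) || PySem.Chars.isIn k.toList rest) with _ | _
  · simp only [Bool.or_eq_false_iff] at h
    rw [Bool.eq_false_iff]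
    intro hin
    rw [PySem.Chars.isIn_iff_infix] at hin
    rcases (List.infix_cons_iff).mp hin with hp | hi
    · exact absurd ((List.isPrefixOf_iff_prefix).mpr hp) (by simp [h.1])
    · exact absurd ((PySem.Chars.isIn_iff_infix _ _).mpr hi) (by simp [h.2])
  · rw [Bool.or_eq_true_iff] at h
    rw [PySem.Chars.isIn_iff_infix, List.infix_cons_iff]
    rcases h with hp | hi
    · exact Or.inl ((List.isPrefixOf_iff_prefix).mp hp)
    · exact Or.inr ((PySem.Chars.isIn_iff_infix _ _).mp hi)

-- the positional scan computes exactly 'some keyword occurs as a substring'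
theorem bScan_eq (l : List Char) :
    bScan l = bKeywords.any (fun k => PySem.Chars.isIn k.toList l) := by
  induction l with
  | nil => decide
  | cons c rest ih =>
    rw [bScan, ih, ← any_or_split]
    refine (any_congr_mem _ _ _ ?_).symm
    intro k hk
    have hne : k.toList ≠ [] := by
      fin_cases hk <;> decide
    exact isIn_cons_eq k hne c rest

-- ===== VERDICT (by name: the statement is the Claim_ definition above) =====
theorem is_remote_location_spec : Claim_equal_is_remote_location := by
  intro location _
  unfold Spec_is_remote_location is_remote_location is_remote_location_alt
  match location with
  | none => rfl
  | some s =>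
    by_cases hs : s = ""
    · simp [hs]
    · simp only [hs, if_false]
      rw [bScan_eq]
      show bKeywords.any (fun keyword => PySem.Str.isIn keyword (PySem.Str.lower s)) = _
      refine any_congr_mem _ _ _ ?_
      intro k _
      rw [PySem.Str.isIn_eq, PySem.Str.toList_lower]
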